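-- pv_equiv track=rewrite | github.com/vis-beep/DSA_Practice | Graphs/2573_Find_the_String_with_LCP.py | findTheString
-- ===== SOURCE A (Python) =====
-- def findTheString(lcp):
--     n = len(lcp)
--
--     # Step 1: DSU (Union-Find)
--     parent = list(range(n))
--
--     def find(x):
--         if parent[x] != x:
--             parent[x] = find(parent[x])
--         return parent[x]
--
--     def union(x, y):
--         px, py = find(x), find(y)
--         if px != py:
--             parent[py] = px
--
--     # Union indices where lcp > 0
--     for i in range(n):
--         for j in range(n):
--             if lcp[i][j] > 0:
--                 union(i, j)
--
--     # Step 2: Assign characters (lexicographically smallest)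
--     group_char = {}
--     res = [''] * n
--     current_char = 'a'
--
--     for i in range(n):
--         root = find(i)
--         if root not in group_char:
--             if current_char > 'z':
--                 return ""
--             group_char[root] = current_char
--             current_char = chr(ord(current_char) + 1)
--         res[i] = group_char[root]
--
--     word = ''.join(res)
--
--     # Step 3: Validate LCP matrix
--     dp = [[0] * n for _ in range(n)]
--
--     for i in range(n - 1, -1, -1):
--         for j in range(n - 1, -1, -1):
--             if word[i] == word[j]:
--                 if i == n - 1 or j == n - 1:
--                     dp[i][j] = 1
--                 else:
--                     dp[i][j] = 1 + dp[i + 1][j + 1]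
--             else:
--                 dp[i][j] = 0
--
--     # Check validity
--     for i in range(n):
--         for j in range(n):
--             if dp[i][j] != lcp[i][j]:
--                 return ""
--
--     return word
-- ===== SOURCE B (Python) =====
-- def findTheString(lcp):
--     n = len(lcp)
--
--     # Greedy grouping: give each still-unlabelled position the next letter,
--     # together with every position j that must share it (lcp[i][j] > 0).
--     word = [''] * n
--     ch = 'a'
--     for i in range(n):
--         if word[i]:
--             continue
--         if ch > 'z':
--             return ""
--         word[i] = ch
--         for j in range(n):
--             if lcp[i][j] > 0:
--                 word[j] = ch
--         ch = chr(ord(ch) + 1)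
--
--     w = ''.join(word)
--
--     # Validate: recompute the LCP matrix of w and compare.
--     dp = [[0] * n for _ in range(n)]
--     for i in range(n - 1, -1, -1):
--         for j in range(n - 1, -1, -1):
--             if w[i] == w[j]:
--                 if i == n - 1 or j == n - 1:
--                     dp[i][j] = 1
--                 else:
--                     dp[i][j] = 1 + dp[i + 1][j + 1]
--             else:
--                 dp[i][j] = 0
--
--     for i in range(n):
--         for j in range(n):
--             if dp[i][j] != lcp[i][j]:
--                 return ""
--
--     return w
-- ===== Notes on version B (the rewrite author's own statement) =====
-- stated objective: simpler
-- what changed: Replaced the union-find (path-compressed DSU plus root-to-letter dict) grouping pass with a single greedy sweep that gives each still-unlabelled index the next letter and labels its direct lcp-positive neighbours in one inner loop; the DP validation phase is unchanged and guarantees both constructions agree whenever either returns a non-empty word.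
import Mathlib
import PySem

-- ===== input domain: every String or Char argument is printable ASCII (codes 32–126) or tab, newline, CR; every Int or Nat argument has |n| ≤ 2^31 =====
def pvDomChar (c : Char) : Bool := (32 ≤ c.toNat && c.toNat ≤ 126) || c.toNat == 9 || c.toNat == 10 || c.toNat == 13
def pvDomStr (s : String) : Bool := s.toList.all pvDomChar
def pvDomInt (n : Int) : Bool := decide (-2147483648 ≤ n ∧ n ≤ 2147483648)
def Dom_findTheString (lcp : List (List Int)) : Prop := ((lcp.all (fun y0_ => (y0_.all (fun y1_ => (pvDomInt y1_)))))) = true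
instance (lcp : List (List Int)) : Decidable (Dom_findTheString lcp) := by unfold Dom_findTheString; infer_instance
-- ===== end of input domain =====

-- B replaces A's union-find grouping with one greedy labelling sweep (objective: simpler); the
-- shared DP validation phase (textually identical in both Pythons) is defined once below and
-- used by both ports.

-- shared helpers: matrix access (total via getD, exact under Pre_) and the validation phase
def pvGet (lcp : List (List Int)) (i j : Nat) : Int := (lcp.getD i []).getD j 0

def pvDpStep (res : List String) (n : Nat) (dp : List (List Int)) (i j : Nat) : List (List Int) :=
  if res.getD i "" = res.getD j "" then
    if i = n - 1 ∨ j = n - 1 then dp.set i ((dp.getD i []).set j 1)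
    else dp.set i ((dp.getD i []).set j (1 + pvGet dp (i+1) (j+1)))
  else dp.set i ((dp.getD i []).set j 0)

def pvDpTable (res : List String) (n : Nat) : List (List Int) :=
  ((List.range n).reverse).foldl
    (fun dp i => ((List.range n).reverse).foldl (fun dp j => pvDpStep res n dp i j) dp)
    (List.replicate n (List.replicate n 0))

def pvValid (lcp : List (List Int)) (res : List String) : Bool :=
  (List.range lcp.length).all (fun i => (List.range lcp.length).all
    (fun j => pvGet (pvDpTable res lcp.length) i j == pvGet lcp i j))

def pvFinish (lcp : List (List Int)) (build : Option (List String)) : String :=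
  match build with
  | none => ""
  | some res => if pvValid lcp res then PySem.Str.join "" res else ""

-- ===== PORT A =====
def pvStep (p : List Nat) (x : Nat) : Nat := p.getD x x

-- recursive `find` with path compression; the fuel argument is only a totality guard
-- (under the forest invariant proved below, chains are shorter than the fuel n+1)
def pvFind : Nat → List Nat → Nat → (List Nat × Nat)
  | 0, p, x => (p, x)
  | f+1, p, x =>
    if pvStep p x = x then (p, x)
    else
      let r := pvFind f p (pvStep p x)
      (r.1.set x r.2, r.2)

def pvUnion (fuel : Nat) (p : List Nat) (x y : Nat) : List Nat :=
  let fx := pvFind fuel p x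
  let fy := pvFind fuel fx.1 y
  if fx.2 ≠ fy.2 then fy.1.set fy.2 fx.2 else fy.1

def pvUnions (lcp : List (List Int)) (n fuel : Nat) : List Nat :=
  (List.range n).foldl
    (fun p i => (List.range n).foldl
      (fun p j => if 0 < pvGet lcp i j then pvUnion fuel p i j else p) p)
    (List.range n)

def pvAssign (fuel : Nat) : List Nat → List Nat → PySem.Dict Nat Char → List String → Char → Option (List String)
  | [], _, _, res, _ => some res
  | i :: is, p, gc, res, cur =>
    let fr := pvFind fuel p i
    match gc.get? fr.2 with
    | some c => pvAssign fuel is fr.1 gc (res.set i (String.ofList [c])) cur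
    | none =>
      if 'z' < cur then none
      else pvAssign fuel is fr.1 (gc.insert fr.2 cur) (res.set i (String.ofList [cur]))
        (Char.ofNat (cur.toNat + 1))

def findTheString (lcp : List (List Int)) : String :=
  let n := lcp.length
  pvFinish lcp (pvAssign (n+1) (List.range n) (pvUnions lcp n (n+1)) PySem.Dict.empty
    (List.replicate n "") 'a')

-- ===== PORT B =====
def pvSpread (lcp : List (List Int)) (n i : Nat) (c : Char) (w : List String) : List String :=
  (List.range n).foldl (fun w j => if 0 < pvGet lcp i j then w.set j (String.ofList [c]) else w) w

def pvGreedy (lcp : List (List Int)) (n : Nat) : List Nat → List String → Char → Option (List String)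
  | [], w, _ => some w
  | i :: is, w, cur =>
    if w.getD i "" ≠ "" then pvGreedy lcp n is w cur
    else if 'z' < cur then none
    else pvGreedy lcp n is (pvSpread lcp n i cur (w.set i (String.ofList [cur])))
      (Char.ofNat (cur.toNat + 1))

def findTheString_alt (lcp : List (List Int)) : String :=
  let n := lcp.length
  pvFinish lcp (pvGreedy lcp n (List.range n) (List.replicate n "") 'a')

-- ===== PRECONDITION & SPEC =====
-- Python A raises IndexError exactly when some row is shorter than the number of rows
-- (both step 1 and the final check read lcp[i][j] for all i, j < len(lcp)); those inputs
-- are excluded.  Rows may be longer; the extra entries are never read.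
def Pre_findTheString (lcp : List (List Int)) : Prop := ∀ row ∈ lcp, lcp.length ≤ row.length
instance (lcp : List (List Int)) : Decidable (Pre_findTheString lcp) := by
  unfold Pre_findTheString; infer_instance

def pvWitness_findTheString : List (List Int) := [[2, 1], [1, 1]]

def Spec_findTheString (lcp : List (List Int)) (out : String) : Prop := out = findTheString_alt lcp
instance (lcp : List (List Int)) (out : String) : Decidable (Spec_findTheString lcp out) := by
  unfold Spec_findTheString; infer_instance

-- ===== CLAIM (what is proved, stated in full; the proofs are below) =====
def Claim_equal_findTheString : Prop := ∀ (lcp : List (List Int)), Dom_findTheString lcp →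
  Pre_findTheString lcp → Spec_findTheString lcp (findTheString lcp)

-- ===== LEMMAS AND PROOFS =====

-- small list-indexing helpers
theorem pv_getD_set_eq {α : Type} (xs : List α) (k : Nat) (v d : α) (h : k < xs.length) :
    (xs.set k v).getD k d = v := by
  simp [List.getD_eq_getElem?_getD, h]

theorem pv_getD_set_ne {α : Type} (xs : List α) (k m : Nat) (v d : α) (h : m ≠ k) :
    (xs.set k v).getD m d = xs.getD m d := by
  simp [List.getD_eq_getElem?_getD, Ne.symm h]

theorem pv_getD_map_range {α : Type} (f : Nat → α) (n k : Nat) (d : α) (h : k < n) :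
    ((List.range n).map f).getD k d = f k := by
  simp [List.getD_eq_getElem?_getD, List.getElem?_map, List.getElem?_range, h]

theorem pv_getD_replicate {α : Type} (n k : Nat) (x d : α) (h : k < n) :
    (List.replicate n x).getD k d = x := by
  simp [List.getD_eq_getElem?_getD, h]

-- the exact LCP value of the assembled word (reference function for the DP table)
def pvExt (res : List String) (n i j : Nat) : Int :=
  if h : i < n ∧ j < n ∧ res.getD i "" = res.getD j "" then
    if i = n - 1 ∨ j = n - 1 then 1 else 1 + pvExt res n (i+1) (j+1)
  else 0
termination_by n - i
decreasing_by omega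

theorem pvExt_nonneg (res : List String) (n : Nat) : ∀ i j, 0 ≤ pvExt res n i j := by
  intro i j
  fun_induction pvExt res n i j with
  | case1 i j h hedge => norm_num
  | case2 i j h hedge ih => omega
  | case3 i j h => norm_num

theorem pvExt_pos_iff (res : List String) (n i j : Nat) (hi : i < n) (hj : j < n) :
    0 < pvExt res n i j ↔ res.getD i "" = res.getD j "" := by
  constructor
  · intro hpos
    by_contra hne
    rw [pvExt.eq_def] at hpos
    rw [dif_neg (by tauto)] at hpos
    exact absurd hpos (by norm_num)
  · intro heq
    rw [pvExt.eq_def, dif_pos ⟨hi, hj, heq⟩]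
    have := pvExt_nonneg res n (i+1) (j+1)
    split <;> omega

-- shape of the dp table
def pvShape (n : Nat) (dp : List (List Int)) : Prop :=
  dp.length = n ∧ ∀ i, i < n → (dp.getD i []).length = n

theorem pvDpStep_eq (res : List String) (n : Nat) (dp : List (List Int)) (i j : Nat) :
    pvDpStep res n dp i j = dp.set i ((dp.getD i []).set j
      (if res.getD i "" = res.getD j "" then
        (if i = n - 1 ∨ j = n - 1 then 1 else 1 + pvGet dp (i+1) (j+1)) else 0)) := by
  unfold pvDpStep; split_ifs <;> rfl

theorem pvDpStep_shape (res : List String) (n : Nat) (dp : List (List Int)) (i j : Nat)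
    (hi : i < n) (hs : pvShape n dp) : pvShape n (pvDpStep res n dp i j) := by
  obtain ⟨hl, hr⟩ := hs
  rw [pvDpStep_eq]
  refine ⟨by simp [hl], ?_⟩
  intro a ha
  by_cases hai : a = i
  · rw [hai, pv_getD_set_eq _ _ _ _ (by rw [hl]; exact hi), List.length_set]
    exact hr i hi
  · rw [pv_getD_set_ne _ _ _ _ _ hai]
    exact hr a ha

theorem pvDpStep_other (res : List String) (n : Nat) (dp : List (List Int)) (i j a b : Nat)
    (hai : a ≠ i) : pvGet (pvDpStep res n dp a b) i j = pvGet dp i j := by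
  rw [pvDpStep_eq]
  unfold pvGet
  rw [pv_getD_set_ne _ _ _ _ _ (Ne.symm hai)]

theorem pvDpStep_same_other (res : List String) (n : Nat) (dp : List (List Int)) (i j b : Nat)
    (hs : pvShape n dp) (hi : i < n) (hb : b ≠ j) :
    pvGet (pvDpStep res n dp i j) i b = pvGet dp i b := by
  rw [pvDpStep_eq]
  unfold pvGet
  rw [pv_getD_set_eq _ _ _ _ (by rw [hs.1]; exact hi), pv_getD_set_ne _ _ _ _ _ hb]

theorem pvDpStep_val (res : List String) (n : Nat) (dp : List (List Int)) (i j : Nat)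
    (hs : pvShape n dp) (hi : i < n) (hj : j < n)
    (habove : ∀ i' j', i < i' → i' < n → j' < n → pvGet dp i' j' = pvExt res n i' j') :
    pvGet (pvDpStep res n dp i j) i j = pvExt res n i j := by
  rw [pvDpStep_eq]
  unfold pvGet
  rw [pv_getD_set_eq _ _ _ _ (by rw [hs.1]; exact hi),
      pv_getD_set_eq _ _ _ _ (by rw [hs.2 i hi]; exact hj)]
  by_cases heq : res.getD i "" = res.getD j ""
  · rw [pvExt.eq_def, dif_pos ⟨hi, hj, heq⟩]
    by_cases hedge : i = n - 1 ∨ j = n - 1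
    · rw [if_pos heq, if_pos hedge, if_pos hedge]
    · rw [if_pos heq, if_neg hedge, if_neg hedge]
      exact congrArg (fun t => 1 + t) (habove (i+1) (j+1) (by omega) (by omega) (by omega))
  · rw [pvExt.eq_def, dif_neg (by tauto), if_neg heq]

theorem pvDp_inner (res : List String) (n i : Nat) (hi : i < n) :
    ∀ m, m ≤ n → ∀ dp, pvShape n dp →
    (∀ i' j', i < i' → i' < n → j' < n → pvGet dp i' j' = pvExt res n i' j') →
    pvShape n (((List.range m).reverse).foldl (fun dp j => pvDpStep res n dp i j) dp) ∧
    (∀ i' j', i' ≠ i →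
      pvGet (((List.range m).reverse).foldl (fun dp j => pvDpStep res n dp i j) dp) i' j' =
        pvGet dp i' j') ∧
    (∀ j', j' < m →
      pvGet (((List.range m).reverse).foldl (fun dp j => pvDpStep res n dp i j) dp) i j' =
        pvExt res n i j') ∧
    (∀ j', m ≤ j' →
      pvGet (((List.range m).reverse).foldl (fun dp j => pvDpStep res n dp i j) dp) i j' =
        pvGet dp i j') := by
  intro m
  induction m with
  | zero =>
    intro _ dp hs habove
    simp only [List.range_zero, List.reverse_nil, List.foldl_nil]
    refine ⟨hs, ?_, ?_, ?_⟩
    · intro i' j' _; trivial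
    · intro j' hj'; omega
    · intro j' _; trivial
  | succ m ih =>
    intro hm dp hs habove
    have hrev : (List.range (m+1)).reverse = m :: (List.range m).reverse := by
      simp [List.range_succ]
    rw [hrev]
    simp only [List.foldl_cons]
    have hs1 : pvShape n (pvDpStep res n dp i m) := pvDpStep_shape res n dp i m (by omega) hs
    have habove1 : ∀ i' j', i < i' → i' < n → j' < n →
        pvGet (pvDpStep res n dp i m) i' j' = pvExt res n i' j' := by
      intro i' j' h1 h2 h3
      rw [pvDpStep_other res n dp i' j' i m (by omega)]
      exact habove i' j' h1 h2 h3
    obtain ⟨c1, c2, c3, c4⟩ := ih (by omega) (pvDpStep res n dp i m) hs1 habove1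
    refine ⟨c1, ?_, ?_, ?_⟩
    · intro i' j' hne
      rw [c2 i' j' hne, pvDpStep_other res n dp i' j' i m (fun h => hne h.symm)]
    · intro j' hj'
      by_cases hjm : j' < m
      · exact c3 j' hjm
      · have hj'm : j' = m := by omega
        subst hj'm
        rw [c4 j' (le_refl _)]
        exact pvDpStep_val res n dp i j' hs hi (by omega) habove
    · intro j' hj'
      rw [c4 j' (by omega), pvDpStep_same_other res n dp i m j' hs hi (by omega)]

theorem pvDp_outer (res : List String) (n : Nat) :
    ∀ m, m ≤ n → ∀ dp, pvShape n dp →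
    (∀ i' j', m ≤ i' → i' < n → j' < n → pvGet dp i' j' = pvExt res n i' j') →
    (∀ i j, i < n → j < n →
      pvGet (((List.range m).reverse).foldl
        (fun dp i => ((List.range n).reverse).foldl (fun dp j => pvDpStep res n dp i j) dp) dp)
        i j = pvExt res n i j) := by
  intro m
  induction m with
  | zero =>
    intro _ dp hs habove i j hi hj
    simp only [List.range_zero, List.reverse_nil, List.foldl_nil]
    exact habove i j (by omega) hi hj
  | succ m ih =>
    intro hm dp hs habove
    have hrev : (List.range (m+1)).reverse = m :: (List.range m).reverse := by
      simp [List.range_succ]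
    rw [hrev]
    simp only [List.foldl_cons]
    obtain ⟨c1, c2, c3, c4⟩ := pvDp_inner res n m (by omega) n (le_refl n) dp hs
      (fun i' j' h1 h2 h3 => habove i' j' (by omega) h2 h3)
    exact ih (by omega) _ c1 (by
      intro i' j' h1 h2 h3
      by_cases him : i' = m
      · subst him; exact c3 j' h3
      · rw [c2 i' j' him]; exact habove i' j' (by omega) h2 h3)

theorem pvDpTable_correct (res : List String) (n : Nat) :
    ∀ i j, i < n → j < n → pvGet (pvDpTable res n) i j = pvExt res n i j := by
  intro i j hi hj
  unfold pvDpTable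
  have hs0 : pvShape n (List.replicate n (List.replicate n (0 : Int))) := by
    refine ⟨by simp, ?_⟩
    intro a ha
    rw [pv_getD_replicate _ _ _ _ ha]
    simp
  exact pvDp_outer res n n (le_refl n) _ hs0 (fun i' j' h1 h2 _ => absurd h2 (by omega)) i j hi hj

theorem pvValid_iff (lcp : List (List Int)) (res : List String) :
    pvValid lcp res = true ↔ ∀ i j, i < lcp.length → j < lcp.length →
      pvGet lcp i j = pvExt res lcp.length i j := by
  unfold pvValid
  simp only [List.all_eq_true, List.mem_range, beq_iff_eq]
  constructor
  · intro h i j hi hj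
    rw [← h i hi j hj]
    exact pvDpTable_correct res lcp.length i j hi hj
  · intro h i hi j hj
    rw [pvDpTable_correct res lcp.length i j hi hj]
    exact (h i j hi hj).symm

theorem pvValid_rel (lcp : List (List Int)) (res : List String)
    (h : pvValid lcp res = true) (i j : Nat) (hi : i < lcp.length) (hj : j < lcp.length) :
    0 < pvGet lcp i j ↔ res.getD i "" = res.getD j "" := by
  rw [(pvValid_iff lcp res).mp h i j hi hj]
  exact pvExt_pos_iff res lcp.length i j hi hj

-- ===== the canonical word determined by lcp (used by both directions) =====
def pvMcAux (lcp : List (List Int)) (j : Nat) : Nat → Nat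
  | k => if _h : k < j then (if 0 < pvGet lcp k j then k else pvMcAux lcp j (k+1)) else j
termination_by k => j - k

def pvMc (lcp : List (List Int)) (j : Nat) : Nat := pvMcAux lcp j 0

def pvL (lcp : List (List Int)) (i : Nat) : Nat :=
  ((List.range i).filter (fun j => pvMc lcp j == j)).length

def pvLetter (k : Nat) : Char := Char.ofNat (97 + k)

def pvWspec (lcp : List (List Int)) (j : Nat) : String :=
  String.ofList [pvLetter (pvL lcp (pvMc lcp j))]

def pvWordSpec (lcp : List (List Int)) : List String :=
  (List.range lcp.length).map (pvWspec lcp)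

theorem pvMcAux_spec (lcp : List (List Int)) (j : Nat) : ∀ k, k ≤ j →
    k ≤ pvMcAux lcp j k ∧ pvMcAux lcp j k ≤ j ∧
    (∀ m, k ≤ m → m < pvMcAux lcp j k → ¬ 0 < pvGet lcp m j) ∧
    (pvMcAux lcp j k < j → 0 < pvGet lcp (pvMcAux lcp j k) j) := by
  intro k
  fun_induction pvMcAux lcp j k with
  | case1 x y hlt hpos =>
    intro _
    exact ⟨by omega, by omega, fun m h1 h2 => by omega, fun _ => hpos⟩
  | case2 x y hlt hpos ih =>
    intro _
    obtain ⟨c1, c2, c3, c4⟩ := ih (by omega)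
    refine ⟨by omega, c2, ?_, c4⟩
    intro m h1 h2
    by_cases hmk : m = y
    · rw [hmk]; exact hpos
    · exact c3 m (by omega) h2
  | case3 x y hge =>
    intro hk
    exact ⟨hk, le_refl _, fun m h1 h2 => by omega, fun hlt => by omega⟩

theorem pvMc_le (lcp : List (List Int)) (j : Nat) : pvMc lcp j ≤ j :=
  (pvMcAux_spec lcp j 0 (by omega)).2.1

theorem pvMc_min (lcp : List (List Int)) (j k : Nat) (h : k < pvMc lcp j) :
    ¬ 0 < pvGet lcp k j :=
  (pvMcAux_spec lcp j 0 (by omega)).2.2.1 k (by omega) h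

theorem pvMc_lt (lcp : List (List Int)) (j : Nat) (h : pvMc lcp j < j) :
    0 < pvGet lcp (pvMc lcp j) j :=
  (pvMcAux_spec lcp j 0 (by omega)).2.2.2 h

-- an "equivalence on range n" bundle for the positivity relation of lcp
def pvReq (lcp : List (List Int)) : Prop :=
  (∀ i, i < lcp.length → 0 < pvGet lcp i i) ∧
  (∀ i j, i < lcp.length → j < lcp.length → 0 < pvGet lcp i j → 0 < pvGet lcp j i) ∧
  (∀ i j k, i < lcp.length → j < lcp.length → k < lcp.length →
    0 < pvGet lcp i j → 0 < pvGet lcp j k → 0 < pvGet lcp i k)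

theorem pvReq_of_valid (lcp : List (List Int)) (res : List String)
    (h : pvValid lcp res = true) : pvReq lcp := by
  refine ⟨?_, ?_, ?_⟩
  · intro i hi
    exact (pvValid_rel lcp res h i i hi hi).mpr rfl
  · intro i j hi hj hij
    exact (pvValid_rel lcp res h j i hj hi).mpr
      ((pvValid_rel lcp res h i j hi hj).mp hij).symm
  · intro i j k hi hj hk h1 h2
    exact (pvValid_rel lcp res h i k hi hk).mpr
      (((pvValid_rel lcp res h i j hi hj).mp h1).trans
        ((pvValid_rel lcp res h j k hj hk).mp h2))

theorem pvMc_rel (lcp : List (List Int)) (hR : pvReq lcp) (j : Nat) (hj : j < lcp.length) :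
    0 < pvGet lcp (pvMc lcp j) j := by
  by_cases h : pvMc lcp j < j
  · exact pvMc_lt lcp j h
  · have : pvMc lcp j = j := by have := pvMc_le lcp j; omega
    rw [this]
    exact hR.1 j hj

theorem pvMc_eq_of_rel (lcp : List (List Int)) (hR : pvReq lcp) (i j : Nat)
    (hi : i < lcp.length) (hj : j < lcp.length) (h : 0 < pvGet lcp i j) :
    pvMc lcp i = pvMc lcp j := by
  have hmi : pvMc lcp i < lcp.length := lt_of_le_of_lt (pvMc_le lcp i) hi
  have hmj : pvMc lcp j < lcp.length := lt_of_le_of_lt (pvMc_le lcp j) hj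
  have h1 : ¬ pvMc lcp j < pvMc lcp i := by
    intro hlt
    exact pvMc_min lcp i (pvMc lcp j) hlt
      (hR.2.2 (pvMc lcp j) j i hmj hj hi (pvMc_rel lcp hR j hj) (hR.2.1 i j hi hj h))
  have h2 : ¬ pvMc lcp i < pvMc lcp j := by
    intro hlt
    exact pvMc_min lcp j (pvMc lcp i) hlt
      (hR.2.2 (pvMc lcp i) i j hmi hi hj (pvMc_rel lcp hR i hi) h)
  omega

theorem pvL_succ (lcp : List (List Int)) (i : Nat) :
    pvL lcp (i+1) = pvL lcp i + (if pvMc lcp i = i then 1 else 0) := by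
  unfold pvL
  rw [List.range_succ, List.filter_append, List.length_append]
  by_cases h : pvMc lcp i = i <;> simp [h]

theorem pvL_mono (lcp : List (List Int)) (i j : Nat) (h : i ≤ j) : pvL lcp i ≤ pvL lcp j := by
  induction j, h using Nat.le_induction with
  | base => exact le_refl _
  | succ m hm ih => rw [pvL_succ]; split <;> omega

theorem pvLetter_gt_z (k : Nat) (h : k ≤ 26) : 'z' < pvLetter k ↔ k = 26 := by
  unfold pvLetter
  interval_cases k <;> decide

theorem pvLetter_succ (k : Nat) (h : k ≤ 25) :
    Char.ofNat ((pvLetter k).toNat + 1) = pvLetter (k+1) := by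
  unfold pvLetter
  interval_cases k <;> decide

theorem pvWspec_ne_empty (lcp : List (List Int)) (j : Nat) : pvWspec lcp j ≠ "" := by
  unfold pvWspec
  intro h
  have := congrArg String.toList h
  simp at this

-- ===== greedy (port B) analysis =====
theorem pvSpread_foldl_length (lcp : List (List Int)) (i : Nat) (c : Char) :
    ∀ (L : List Nat) (w : List String),
    ((L.foldl (fun w j => if 0 < pvGet lcp i j then w.set j (String.ofList [c]) else w) w)).length
      = w.length := by
  intro L
  induction L with
  | nil => intro w; rfl
  | cons j L ih =>
    intro w
    rw [List.foldl_cons, ih]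
    split <;> simp

theorem pvSpread_length (lcp : List (List Int)) (n i : Nat) (c : Char) (w : List String) :
    (pvSpread lcp n i c w).length = w.length := by
  unfold pvSpread
  exact pvSpread_foldl_length lcp i c (List.range n) w

theorem pv_getD_default_of_le {α : Type} (xs : List α) (t : Nat) (d : α)
    (h : xs.length ≤ t) : xs.getD t d = d := by
  simp [List.getD_eq_getElem?_getD, List.getElem?_eq_none (by omega)]

theorem pvSpread_foldl_getD (lcp : List (List Int)) (i : Nat) (c : Char) :
    ∀ (L : List Nat) (w : List String) (t : Nat),
    ((L.foldl (fun w j => if 0 < pvGet lcp i j then w.set j (String.ofList [c]) else w) w)).getD t ""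
      = if t ∈ L ∧ t < w.length ∧ 0 < pvGet lcp i t then String.ofList [c]
        else w.getD t "" := by
  intro L
  induction L with
  | nil => intro w t; simp
  | cons j L ih =>
    intro w t
    rw [List.foldl_cons, ih]
    have hlen : (if 0 < pvGet lcp i j then w.set j (String.ofList [c]) else w).length = w.length := by
      split <;> simp
    by_cases ht : t < w.length ∧ 0 < pvGet lcp i t
    · by_cases htL : t ∈ L
      · rw [if_pos ⟨htL, by rw [hlen]; exact ht.1, ht.2⟩, if_pos ⟨List.mem_cons_of_mem j htL, ht⟩]
      · rw [if_neg (by tauto)]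
        by_cases htj : t = j
        · subst htj
          rw [if_pos ht.2, pv_getD_set_eq _ _ _ _ ht.1, if_pos ⟨List.mem_cons_self, ht⟩]
        · have : (if 0 < pvGet lcp i j then w.set j (String.ofList [c]) else w).getD t "" =
              w.getD t "" := by
            split
            · exact pv_getD_set_ne _ _ _ _ _ htj
            · rfl
          rw [this, if_neg (by simp [htj, htL])]
    · have hc1 : ¬(t ∈ L ∧
          t < (if 0 < pvGet lcp i j then w.set j (String.ofList [c]) else w).length ∧
          0 < pvGet lcp i t) := by
        rw [hlen]; tauto
      have hc2 : ¬(t ∈ j :: L ∧ t < w.length ∧ 0 < pvGet lcp i t) := by tauto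
      rw [if_neg hc1, if_neg hc2]
      by_cases hj : 0 < pvGet lcp i j
      · rw [if_pos hj]
        by_cases htj : t = j
        · subst htj
          have hge : w.length ≤ t := by
            by_contra hlt
            exact ht ⟨by omega, hj⟩
          rw [pv_getD_default_of_le _ _ _ (by simpa using hge),
              pv_getD_default_of_le _ _ _ hge]
        · exact pv_getD_set_ne _ _ _ _ _ htj
      · rw [if_neg hj]

theorem pvSpread_getD (lcp : List (List Int)) (n i : Nat) (c : Char) (w : List String) (t : Nat) :
    (pvSpread lcp n i c w).getD t "" =
      if t < n ∧ t < w.length ∧ 0 < pvGet lcp i t then String.ofList [c] else w.getD t "" := by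
  unfold pvSpread
  rw [pvSpread_foldl_getD]
  simp [List.mem_range]

-- the partially built word after the greedy loop has processed indices < i
def pvWpart (lcp : List (List Int)) (i : Nat) : List String :=
  (List.range lcp.length).map (fun j => if pvMc lcp j < i then pvWspec lcp j else "")

theorem pvWpart_length (lcp : List (List Int)) (i : Nat) :
    (pvWpart lcp i).length = lcp.length := by
  simp [pvWpart]

theorem pvWpart_getD (lcp : List (List Int)) (i t : Nat) (ht : t < lcp.length) :
    (pvWpart lcp i).getD t "" = if pvMc lcp t < i then pvWspec lcp t else "" := by
  unfold pvWpart
  rw [pv_getD_map_range _ _ _ _ ht]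

theorem pv_list_eq_of_getD (xs ys : List String) (hl : xs.length = ys.length)
    (h : ∀ t, t < xs.length → xs.getD t "" = ys.getD t "") : xs = ys := by
  apply List.ext_getElem hl
  intro t h1 h2
  have := h t h1
  rwa [List.getD_eq_getElem _ _ h1, List.getD_eq_getElem _ _ h2] at this

theorem pvMc_ne_of_not_rel (lcp : List (List Int)) (hR : pvReq lcp) (i t : Nat)
    (hi : i < lcp.length) (ht : t < lcp.length) (h : ¬ 0 < pvGet lcp i t) :
    pvMc lcp t ≠ i := by
  intro he
  exact h (he ▸ pvMc_rel lcp hR t ht)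

theorem pvWpart_step (lcp : List (List Int)) (hR : pvReq lcp) (i : Nat)
    (hi : i < lcp.length) (hmi : pvMc lcp i = i) :
    pvSpread lcp lcp.length i (pvLetter (pvL lcp i))
        ((pvWpart lcp i).set i (String.ofList [pvLetter (pvL lcp i)])) =
      pvWpart lcp (i+1) := by
  apply pv_list_eq_of_getD
  · rw [pvSpread_length, List.length_set, pvWpart_length, pvWpart_length]
  · intro t htl
    rw [pvSpread_length, List.length_set, pvWpart_length] at htl
    rw [pvSpread_getD, pvWpart_getD lcp (i+1) t htl]
    by_cases hrel : 0 < pvGet lcp i t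
    · rw [if_pos ⟨htl, by rw [List.length_set, pvWpart_length]; exact htl, hrel⟩]
      have hmt : pvMc lcp t = i := by
        rw [← (pvMc_eq_of_rel lcp hR i t hi htl hrel), hmi]
      rw [if_pos (by omega)]
      unfold pvWspec
      rw [hmt]
    · rw [if_neg (by tauto)]
      by_cases hti : t = i
      · subst hti
        rw [pv_getD_set_eq _ _ _ _ (by rw [pvWpart_length]; exact htl)]
        rw [if_pos (by omega)]
        unfold pvWspec
        rw [hmi]
      · rw [pv_getD_set_ne _ _ _ _ _ hti, pvWpart_getD lcp i t htl]
        have hne : pvMc lcp t ≠ i := pvMc_ne_of_not_rel lcp hR i t hi htl hrel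
        by_cases hlt : pvMc lcp t < i
        · rw [if_pos hlt, if_pos (by omega)]
        · rw [if_neg hlt, if_neg (by omega)]

theorem pvWpart_skip (lcp : List (List Int)) (hR : pvReq lcp) (i : Nat)
    (hi : i < lcp.length) (hmc : pvMc lcp i < i) :
    pvWpart lcp (i+1) = pvWpart lcp i := by
  apply pv_list_eq_of_getD
  · rw [pvWpart_length, pvWpart_length]
  · intro t htl
    rw [pvWpart_length] at htl
    rw [pvWpart_getD lcp (i+1) t htl, pvWpart_getD lcp i t htl]
    have hne : pvMc lcp t ≠ i := by
      intro he
      have hrel : 0 < pvGet lcp i t := he ▸ pvMc_rel lcp hR t htl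
      have := pvMc_eq_of_rel lcp hR i t hi htl hrel
      omega
    by_cases hlt : pvMc lcp t < i
    · rw [if_pos (by omega), if_pos hlt]
    · rw [if_neg (by omega), if_neg hlt]

theorem pvGreedy_spec (lcp : List (List Int)) (hR : pvReq lcp) :
    ∀ d i, i + d = lcp.length → pvL lcp i ≤ 26 →
    pvGreedy lcp lcp.length (List.range' i d) (pvWpart lcp i) (pvLetter (pvL lcp i)) =
      (if 26 < pvL lcp lcp.length then none else some (pvWordSpec lcp)) := by
  intro d
  induction d with
  | zero =>
    intro i hsum hL
    have hin : i = lcp.length := by omega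
    subst hin
    rw [if_neg (by omega)]
    show some (pvWpart lcp lcp.length) = some (pvWordSpec lcp)
    congr 1
    apply pv_list_eq_of_getD
    · rw [pvWpart_length]; simp [pvWordSpec]
    · intro t htl
      rw [pvWpart_length] at htl
      rw [pvWpart_getD lcp _ t htl, if_pos (by have := pvMc_le lcp t; omega)]
      unfold pvWordSpec
      rw [pv_getD_map_range _ _ _ _ htl]
  | succ d ih =>
    intro i hsum hL
    have hi : i < lcp.length := by omega
    rw [List.range'_succ]
    simp only [pvGreedy]
    rw [pvWpart_getD lcp i i hi]
    by_cases hmc : pvMc lcp i < i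
    · rw [if_pos hmc, if_pos (pvWspec_ne_empty lcp i)]
      have hLs : pvL lcp (i+1) = pvL lcp i := by
        rw [pvL_succ, if_neg (by omega)]; omega
      rw [← pvWpart_skip lcp hR i hi hmc, ← hLs]
      exact ih (i+1) (by omega) (by omega)
    · have hmi : pvMc lcp i = i := by have := pvMc_le lcp i; omega
      rw [if_neg hmc]
      rw [if_neg (by simp)]
      by_cases hov : pvL lcp i = 26
      · rw [if_pos ((pvLetter_gt_z _ hL).mpr hov)]
        have h1 : pvL lcp (i+1) = 27 := by rw [pvL_succ, if_pos hmi]; omega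
        have h2 := pvL_mono lcp (i+1) lcp.length (by omega)
        rw [if_pos (by omega)]
      · rw [if_neg (fun hgt => hov ((pvLetter_gt_z _ hL).mp hgt))]
        have hLs : pvL lcp (i+1) = pvL lcp i + 1 := by rw [pvL_succ, if_pos hmi]
        rw [pvWpart_step lcp hR i hi hmi]
        have hcur : Char.ofNat ((pvLetter (pvL lcp i)).toNat + 1) = pvLetter (pvL lcp (i+1)) := by
          rw [hLs]
          exact pvLetter_succ _ (by omega)
        rw [hcur]
        exact ih (i+1) (by omega) (by omega)

theorem pvGreedy_main (lcp : List (List Int)) (hR : pvReq lcp) :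
    pvGreedy lcp lcp.length (List.range lcp.length) (List.replicate lcp.length "") 'a' =
      (if 26 < pvL lcp lcp.length then none else some (pvWordSpec lcp)) := by
  have h0 : pvWpart lcp 0 = List.replicate lcp.length "" := by
    apply pv_list_eq_of_getD
    · rw [pvWpart_length]; simp
    · intro t htl
      rw [pvWpart_length] at htl
      rw [pvWpart_getD lcp 0 t htl, if_neg (by omega), pv_getD_replicate _ _ _ _ htl]
  have hL0 : pvL lcp 0 = 0 := by simp [pvL]
  have ha : 'a' = pvLetter (pvL lcp 0) := by rw [hL0]; decide
  rw [← h0, List.range_eq_range', ha]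
  exact pvGreedy_spec lcp hR lcp.length 0 (by omega) (by omega)

-- ===== DSU (port A) analysis =====
def pvRt : Nat → List Nat → Nat → Nat
  | 0, _, x => x
  | f+1, p, x => if pvStep p x = x then x else pvRt f p (pvStep p x)
def pvRoot (p : List Nat) (x : Nat) : Nat := pvRt p.length p x
def pvCsize (n : Nat) (p : List Nat) (x : Nat) : Nat :=
  ((List.range n).filter (fun z => pvRoot p z == pvRoot p x)).length
def pvGood (n : Nat) (p : List Nat) (h : Nat → Nat) : Prop :=
  p.length = n ∧ (∀ x, x < n → pvStep p x < n) ∧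
  (∀ x, x < n → pvStep p x ≠ x → h (pvStep p x) < h x) ∧
  (∀ x, x < n → pvStep p x = x → h x = 0) ∧
  (∀ x, x < n → h x < pvCsize n p x)
def pvRC (lcp : List (List Int)) (p : List Nat) : Prop :=
  ∀ z, z < lcp.length → 0 < pvGet lcp (pvStep p z) z
def pvInv (lcp : List (List Int)) (p : List Nat) : Prop :=
  (∃ h, pvGood lcp.length p h) ∧ pvRC lcp p
-- rt layer
theorem pvRt_lt (n : Nat) (p : List Nat) (hent : ∀ x, x < n → pvStep p x < n) :
    ∀ f x, x < n → pvRt f p x < n := by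
  intro f
  induction f with
  | zero => intro x hx; exact hx
  | succ f ih =>
    intro x hx
    unfold pvRt
    split
    · exact hx
    · exact ih _ (hent x hx)

theorem pvRt_fix (p : List Nat) (f x : Nat) (h : pvStep p x = x) : pvRt f p x = x := by
  cases f with
  | zero => rfl
  | succ f => unfold pvRt; rw [if_pos h]

theorem pvRt_root (n : Nat) (p : List Nat) (h : Nat → Nat)
    (hent : ∀ x, x < n → pvStep p x < n)
    (hdec : ∀ x, x < n → pvStep p x ≠ x → h (pvStep p x) < h x) :
    ∀ f x, x < n → h x < f → pvStep p (pvRt f p x) = pvRt f p x := by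
  intro f
  induction f with
  | zero => intro x hx hf; omega
  | succ f ih =>
    intro x hx hf
    unfold pvRt
    split
    · assumption
    · rename_i hne
      exact ih _ (hent x hx) (by have := hdec x hx hne; omega)

theorem pvRt_agree (n : Nat) (p : List Nat) (h : Nat → Nat)
    (hent : ∀ x, x < n → pvStep p x < n)
    (hdec : ∀ x, x < n → pvStep p x ≠ x → h (pvStep p x) < h x) :
    ∀ f g x, x < n → h x < f → h x < g → pvRt f p x = pvRt g p x := by
  intro f
  induction f with
  | zero => intro g x hx hf hg; omega
  | succ f ih =>
    intro g x hx hf hg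
    cases g with
    | zero => omega
    | succ g =>
      show pvRt (f+1) p x = pvRt (g+1) p x
      unfold pvRt
      split
      · rfl
      · rename_i hne
        exact ih g _ (hent x hx) (by have := hdec x hx hne; omega)
          (by have := hdec x hx hne; omega)

theorem pvRt_succ (f : Nat) (p : List Nat) (x : Nat) :
    pvRt (f+1) p x = if pvStep p x = x then x else pvRt f p (pvStep p x) := rfl

theorem pvRoot_lt (n : Nat) (p : List Nat) (hlen : p.length = n)
    (hent : ∀ x, x < n → pvStep p x < n) (x : Nat) (hx : x < n) : pvRoot p x < n := by
  unfold pvRoot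
  rw [hlen]
  exact pvRt_lt n p hent n x hx

theorem pvRoot_root (n : Nat) (p : List Nat) (h : Nat → Nat) (hlen : p.length = n)
    (hent : ∀ x, x < n → pvStep p x < n)
    (hdec : ∀ x, x < n → pvStep p x ≠ x → h (pvStep p x) < h x)
    (hb : ∀ x, x < n → h x < n) (x : Nat) (hx : x < n) :
    pvStep p (pvRoot p x) = pvRoot p x := by
  unfold pvRoot
  rw [hlen]
  exact pvRt_root n p h hent hdec n x hx (hb x hx)

theorem pvRoot_fix (p : List Nat) (x : Nat) (h : pvStep p x = x) : pvRoot p x = x :=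
  pvRt_fix p _ x h

theorem pvRoot_step (n : Nat) (p : List Nat) (h : Nat → Nat) (hlen : p.length = n)
    (hent : ∀ x, x < n → pvStep p x < n)
    (hdec : ∀ x, x < n → pvStep p x ≠ x → h (pvStep p x) < h x)
    (hb : ∀ x, x < n → h x < n) (x : Nat) (hx : x < n) (hne : pvStep p x ≠ x) :
    pvRoot p x = pvRoot p (pvStep p x) := by
  unfold pvRoot
  rw [hlen]
  have hxn : 0 < n := by omega
  obtain ⟨m, hm⟩ : ∃ m, n = m + 1 := ⟨n - 1, by omega⟩
  have h1 : pvRt n p x = pvRt m p (pvStep p x) := by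
    rw [hm, pvRt_succ, if_neg hne]
  rw [h1]
  exact pvRt_agree n p h hent hdec m n (pvStep p x) (hent x hx)
    (by have := hdec x hx hne; have := hb x hx; omega)
    (by have := hdec x hx hne; have := hb x hx; omega)

theorem pvRoot_zero (n : Nat) (p : List Nat) (h : Nat → Nat) (hlen : p.length = n)
    (hent : ∀ x, x < n → pvStep p x < n)
    (hdec : ∀ x, x < n → pvStep p x ≠ x → h (pvStep p x) < h x)
    (hzero : ∀ x, x < n → pvStep p x = x → h x = 0)
    (hb : ∀ x, x < n → h x < n) (x : Nat) (hx : x < n) : h (pvRoot p x) = 0 :=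
  hzero _ (pvRoot_lt n p hlen hent x hx) (pvRoot_root n p h hlen hent hdec hb x hx)

theorem pvRoot_self_step (n : Nat) (p : List Nat) (h : Nat → Nat) (hlen : p.length = n)
    (hent : ∀ x, x < n → pvStep p x < n)
    (hdec : ∀ x, x < n → pvStep p x ≠ x → h (pvStep p x) < h x)
    (hzero : ∀ x, x < n → pvStep p x = x → h x = 0)
    (hb : ∀ x, x < n → h x < n) (x : Nat) (hx : x < n) (hr : pvRoot p x = x) :
    pvStep p x = x := by
  by_contra hne
  have h1 : h x = 0 := by
    have := pvRoot_zero n p h hlen hent hdec hzero hb x hx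
    rwa [hr] at this
  have := hdec x hx hne
  omega

theorem pvStep_set_eq (p : List Nat) (x v : Nat) (h : x < p.length) :
    pvStep (p.set x v) x = v := by
  unfold pvStep
  rw [pv_getD_set_eq _ _ _ _ h]

theorem pvStep_set_ne (p : List Nat) (x v z : Nat) (h : z ≠ x) :
    pvStep (p.set x v) z = pvStep p z := by
  unfold pvStep
  rw [pv_getD_set_ne _ _ _ _ _ h]

theorem pvCompress (n : Nat) (p : List Nat) (h : Nat → Nat) (hlen : p.length = n)
    (hent : ∀ x, x < n → pvStep p x < n)
    (hdec : ∀ x, x < n → pvStep p x ≠ x → h (pvStep p x) < h x)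
    (hzero : ∀ x, x < n → pvStep p x = x → h x = 0)
    (hb : ∀ x, x < n → h x < n) (x : Nat) (hx : x < n) (hxne : pvStep p x ≠ x) :
    (p.set x (pvRoot p x)).length = n ∧
    (∀ z, z < n → pvStep (p.set x (pvRoot p x)) z < n) ∧
    (∀ z, z < n → pvStep (p.set x (pvRoot p x)) z ≠ z →
      h (pvStep (p.set x (pvRoot p x)) z) < h z) ∧
    (∀ z, z < n → pvStep (p.set x (pvRoot p x)) z = z → h z = 0) ∧
    (∀ z, z < n → pvRoot (p.set x (pvRoot p x)) z = pvRoot p z) := by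
  have hr_lt : pvRoot p x < n := pvRoot_lt n p hlen hent x hx
  have hr_root : pvStep p (pvRoot p x) = pvRoot p x :=
    pvRoot_root n p h hlen hent hdec hb x hx
  have hr_zero : h (pvRoot p x) = 0 := pvRoot_zero n p h hlen hent hdec hzero hb x hx
  have hx_pos : 0 < h x := by have := hdec x hx hxne; omega
  have hrne : pvRoot p x ≠ x := fun he => by rw [he] at hr_zero; omega
  have hstep_ne : ∀ z, z ≠ x → pvStep (p.set x (pvRoot p x)) z = pvStep p z := by
    intro z hz
    unfold pvStep
    rw [pv_getD_set_ne _ _ _ _ _ hz]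
  have hstep_x : pvStep (p.set x (pvRoot p x)) x = pvRoot p x := by
    unfold pvStep
    rw [pv_getD_set_eq _ _ _ _ (by rw [hlen]; exact hx)]
  have hlen2 : (p.set x (pvRoot p x)).length = n := by rw [List.length_set]; exact hlen
  have hent2 : ∀ z, z < n → pvStep (p.set x (pvRoot p x)) z < n := by
    intro z hz
    by_cases hzx : z = x
    · rw [hzx, hstep_x]; exact hr_lt
    · rw [hstep_ne z hzx]; exact hent z hz
  have hdec2 : ∀ z, z < n → pvStep (p.set x (pvRoot p x)) z ≠ z →
      h (pvStep (p.set x (pvRoot p x)) z) < h z := by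
    intro z hz hne
    by_cases hzx : z = x
    · subst hzx; rw [hstep_x]; omega
    · rw [hstep_ne z hzx] at hne ⊢; exact hdec z hz hne
  have hzero2 : ∀ z, z < n → pvStep (p.set x (pvRoot p x)) z = z → h z = 0 := by
    intro z hz he
    by_cases hzx : z = x
    · subst hzx; rw [hstep_x] at he; exact absurd he hrne
    · rw [hstep_ne z hzx] at he; exact hzero z hz he
  refine ⟨hlen2, hent2, hdec2, hzero2, ?_⟩
  have H : ∀ m z, z < n → h z ≤ m → pvRoot (p.set x (pvRoot p x)) z = pvRoot p z := by
    intro m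
    induction m with
    | zero =>
      intro z hz hm
      by_cases hzx : z = x
      · rw [hzx] at hm; omega
      · by_cases hzr : pvStep p z = z
        · rw [pvRoot_fix (p.set x (pvRoot p x)) z (by rw [hstep_ne z hzx]; exact hzr),
              pvRoot_fix p z hzr]
        · have := hdec z hz hzr; omega
    | succ m ih =>
      intro z hz hm
      by_cases hzx : z = x
      · rw [hzx]
        have h1 : pvRoot (p.set x (pvRoot p x)) x =
            pvRoot (p.set x (pvRoot p x)) (pvRoot p x) := by
          rw [pvRoot_step n _ h hlen2 hent2 hdec2 hb x hx (by rw [hstep_x]; exact hrne),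
              hstep_x]
        rw [h1, pvRoot_fix (p.set x (pvRoot p x)) (pvRoot p x)
          (by rw [hstep_ne _ hrne]; exact hr_root)]
      · by_cases hzr : pvStep p z = z
        · rw [pvRoot_fix (p.set x (pvRoot p x)) z (by rw [hstep_ne z hzx]; exact hzr),
              pvRoot_fix p z hzr]
        · have h1 : pvRoot (p.set x (pvRoot p x)) z =
              pvRoot (p.set x (pvRoot p x)) (pvStep p z) := by
            rw [pvRoot_step n _ h hlen2 hent2 hdec2 hb z hz (by rw [hstep_ne z hzx]; exact hzr),
                hstep_ne z hzx]
          rw [h1, ih (pvStep p z) (hent z hz) (by have := hdec z hz hzr; omega)]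
          rw [← pvRoot_step n p h hlen hent hdec hb z hz hzr]
  exact fun z hz => H (h z) z hz (le_refl _)

theorem pvFind_succ (f : Nat) (p : List Nat) (x : Nat) :
    pvFind (f+1) p x = if pvStep p x = x then (p, x)
      else ((pvFind f p (pvStep p x)).1.set x (pvFind f p (pvStep p x)).2,
        (pvFind f p (pvStep p x)).2) := rfl

theorem pvFind_go (n : Nat) (p : List Nat) (h : Nat → Nat) (hlen : p.length = n)
    (hent : ∀ x, x < n → pvStep p x < n)
    (hdec : ∀ x, x < n → pvStep p x ≠ x → h (pvStep p x) < h x)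
    (hzero : ∀ x, x < n → pvStep p x = x → h x = 0)
    (hb : ∀ x, x < n → h x < n) :
    ∀ f x, x < n → h x < f →
    (pvFind f p x).2 = pvRoot p x ∧
    (pvFind f p x).1.length = n ∧
    (∀ z, z < n → pvStep (pvFind f p x).1 z < n) ∧
    (∀ z, z < n → pvStep (pvFind f p x).1 z ≠ z → h (pvStep (pvFind f p x).1 z) < h z) ∧
    (∀ z, z < n → pvStep (pvFind f p x).1 z = z → h z = 0) ∧
    (∀ z, z < n → pvRoot (pvFind f p x).1 z = pvRoot p z) ∧
    (∀ z, z < n → pvStep (pvFind f p x).1 z = pvStep p z ∨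
      pvStep (pvFind f p x).1 z = pvRoot p z) := by
  intro f
  induction f with
  | zero => intro x hx hf; omega
  | succ f ih =>
    intro x hx hf
    rw [pvFind_succ]
    by_cases hroot : pvStep p x = x
    · rw [if_pos hroot]
      exact ⟨(pvRoot_fix p x hroot).symm, hlen, hent, hdec, hzero,
        fun z _ => rfl, fun z _ => Or.inl rfl⟩
    · rw [if_neg hroot]
      have hfx : h (pvStep p x) < f := by have := hdec x hx hroot; omega
      obtain ⟨i1, i2, i3, i4, i5, i6, i7⟩ := ih (pvStep p x) (hent x hx) hfx
      have hr2 : (pvFind f p (pvStep p x)).2 = pvRoot p x := by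
        rw [i1, ← pvRoot_step n p h hlen hent hdec hb x hx hroot]
      have hxr1 : pvStep (pvFind f p (pvStep p x)).1 x ≠ x := by
        intro he
        have h0 := i5 x hx he
        have := hdec x hx hroot
        omega
      have hr1x : pvRoot (pvFind f p (pvStep p x)).1 x = pvRoot p x := i6 x hx
      obtain ⟨c1, c2, c3, c4, c5⟩ := pvCompress n (pvFind f p (pvStep p x)).1 h i2 i3 i4 i5 hb
        x hx hxr1
      rw [hr1x] at c1 c2 c3 c4 c5
      rw [hr2]
      refine ⟨rfl, c1, c2, c3, c4, ?_, ?_⟩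
      · intro z hz
        rw [c5 z hz]
        exact i6 z hz
      · intro z hz
        by_cases hzx : z = x
        · right
          rw [hzx]
          exact pvStep_set_eq _ _ _ (by rw [i2]; exact hx)
        · rw [pvStep_set_ne _ _ _ _ hzx]
          exact i7 z hz

-- chain: every node is related to its root (for an RB-compatible parent list)
theorem pvRoot_relGen (n : Nat) (RB : Nat → Nat → Prop) (p : List Nat) (h : Nat → Nat)
    (hlen : p.length = n) (hent : ∀ x, x < n → pvStep p x < n)
    (hdec : ∀ x, x < n → pvStep p x ≠ x → h (pvStep p x) < h x)
    (hb : ∀ x, x < n → h x < n)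
    (hsymm : ∀ i j, i < n → j < n → RB i j → RB j i)
    (htrans : ∀ i j k, i < n → j < n → k < n → RB i j → RB j k → RB i k)
    (hrc : ∀ z, z < n → RB (pvStep p z) z) :
    ∀ x, x < n → RB (pvRoot p x) x := by
  have H : ∀ m x, x < n → h x ≤ m → RB (pvRoot p x) x := by
    intro m
    induction m with
    | zero =>
      intro x hx hm
      by_cases hroot : pvStep p x = x
      · rw [pvRoot_fix p x hroot]
        have := hrc x hx
        rwa [hroot] at this
      · have := hdec x hx hroot; omega
    | succ m ih =>
      intro x hx hm
      by_cases hroot : pvStep p x = x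
      · rw [pvRoot_fix p x hroot]
        have := hrc x hx
        rwa [hroot] at this
      · rw [pvRoot_step n p h hlen hent hdec hb x hx hroot]
        have h1 : RB (pvRoot p (pvStep p x)) (pvStep p x) :=
          ih (pvStep p x) (hent x hx) (by have := hdec x hx hroot; omega)
        have h2 : RB (pvStep p x) x := hrc x hx
        exact htrans _ _ _ (pvRoot_lt n p hlen hent _ (hent x hx)) (hent x hx) hx h1 h2
  exact fun x hx => H (h x) x hx (le_refl _)

theorem pvCsize_le (n : Nat) (p : List Nat) (x : Nat) : pvCsize n p x ≤ n := by
  unfold pvCsize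
  calc ((List.range n).filter _).length ≤ (List.range n).length := List.length_filter_le _ _
  _ = n := List.length_range

theorem pvCsize_pos (n : Nat) (p : List Nat) (x : Nat) (hx : x < n) : 0 < pvCsize n p x := by
  unfold pvCsize
  have : x ∈ (List.range n).filter (fun z => pvRoot p z == pvRoot p x) := by
    rw [List.mem_filter]
    exact ⟨List.mem_range.mpr hx, by simp⟩
  exact List.length_pos_of_mem this

theorem pvCsize_congr (n : Nat) (p' p : List Nat) (x : Nat) (hx : x < n)
    (hroots : ∀ z, z < n → pvRoot p' z = pvRoot p z) : pvCsize n p' x = pvCsize n p x := by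
  unfold pvCsize
  congr 1
  apply List.filter_congr
  intro z hz
  rw [hroots z (List.mem_range.mp hz), hroots x hx]

theorem pv_filter_or_length (l : List Nat) (p q : Nat → Bool)
    (hdisj : ∀ x ∈ l, ¬(p x = true ∧ q x = true)) :
    (l.filter (fun x => p x || q x)).length = (l.filter p).length + (l.filter q).length := by
  induction l with
  | nil => rfl
  | cons a l ih =>
    have ih' := ih (fun x hx => hdisj x (List.mem_cons_of_mem a hx))
    by_cases hp : p a = true
    · have hq : ¬ q a = true := fun hq => hdisj a List.mem_cons_self ⟨hp, hq⟩
      simp only [List.filter_cons, hp, hq]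
      simp [ih']
      omega
    · by_cases hq : q a = true
      · simp only [List.filter_cons, hp, hq]
        simp [ih']
        omega
      · simp only [List.filter_cons, hp, hq]
        simp [ih']

theorem pvUnion_eq (fuel : Nat) (p : List Nat) (x y : Nat) :
    pvUnion fuel p x y =
      if (pvFind fuel p x).2 ≠ (pvFind fuel (pvFind fuel p x).1 y).2
      then (pvFind fuel (pvFind fuel p x).1 y).1.set
        (pvFind fuel (pvFind fuel p x).1 y).2 (pvFind fuel p x).2
      else (pvFind fuel (pvFind fuel p x).1 y).1 := rfl

theorem pvCsize_eq_of_rooteq (n : Nat) (p : List Nat) (z u : Nat)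
    (h : pvRoot p z = pvRoot p u) : pvCsize n p z = pvCsize n p u := by
  unfold pvCsize
  rw [h]

theorem pvUnion_go (n : Nat) (RB : Nat → Nat → Prop) (p : List Nat) (h : Nat → Nat)
    (hlen : p.length = n) (hent : ∀ x, x < n → pvStep p x < n)
    (hdec : ∀ x, x < n → pvStep p x ≠ x → h (pvStep p x) < h x)
    (hzero : ∀ x, x < n → pvStep p x = x → h x = 0)
    (hbound : ∀ x, x < n → h x < pvCsize n p x)
    (hsymm : ∀ i j, i < n → j < n → RB i j → RB j i)
    (htrans : ∀ i j k, i < n → j < n → k < n → RB i j → RB j k → RB i k)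
    (hrc : ∀ z, z < n → RB (pvStep p z) z)
    (x y : Nat) (hx : x < n) (hy : y < n) (hxy : RB x y) :
    ∃ h2 : Nat → Nat,
    (pvUnion (n+1) p x y).length = n ∧
    (∀ z, z < n → pvStep (pvUnion (n+1) p x y) z < n) ∧
    (∀ z, z < n → pvStep (pvUnion (n+1) p x y) z ≠ z →
      h2 (pvStep (pvUnion (n+1) p x y) z) < h2 z) ∧
    (∀ z, z < n → pvStep (pvUnion (n+1) p x y) z = z → h2 z = 0) ∧
    (∀ z, z < n → h2 z < pvCsize n (pvUnion (n+1) p x y) z) ∧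
    (∀ z, z < n → RB (pvStep (pvUnion (n+1) p x y) z) z) ∧
    (∀ z, z < n → pvRoot (pvUnion (n+1) p x y) z =
      if pvRoot p z = pvRoot p y then pvRoot p x else pvRoot p z) := by
  have hb : ∀ z, z < n → h z < n :=
    fun z hz => lt_of_lt_of_le (hbound z hz) (pvCsize_le n p z)
  obtain ⟨a1, a2, a3, a4, a5, a6, a7⟩ :=
    pvFind_go n p h hlen hent hdec hzero hb (n+1) x hx (by have := hb x hx; omega)
  obtain ⟨b1, b2, b3, b4, b5, b6, b7⟩ :=
    pvFind_go n (pvFind (n+1) p x).1 h a2 a3 a4 a5 hb (n+1) y hy (by have := hb y hy; omega)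
  have hpres : ∀ z, z < n →
      pvRoot (pvFind (n+1) (pvFind (n+1) p x).1 y).1 z = pvRoot p z := by
    intro z hz
    rw [b6 z hz, a6 z hz]
  have hrel : ∀ z, z < n → RB (pvRoot p z) z :=
    pvRoot_relGen n RB p h hlen hent hdec hb hsymm htrans hrc
  have rca : ∀ z, z < n → RB (pvStep (pvFind (n+1) p x).1 z) z := by
    intro z hz
    rcases a7 z hz with hc | hc
    · rw [hc]; exact hrc z hz
    · rw [hc]; exact hrel z hz
  have hrel_a : ∀ z, z < n → RB (pvRoot (pvFind (n+1) p x).1 z) z :=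
    pvRoot_relGen n RB _ h a2 a3 a4 hb hsymm htrans rca
  have rcb : ∀ z, z < n → RB (pvStep (pvFind (n+1) (pvFind (n+1) p x).1 y).1 z) z := by
    intro z hz
    rcases b7 z hz with hc | hc
    · rw [hc]; exact rca z hz
    · rw [hc]; exact hrel_a z hz
  have e1 : (pvFind (n+1) p x).2 = pvRoot p x := a1
  have e2 : (pvFind (n+1) (pvFind (n+1) p x).1 y).2 = pvRoot p y := by
    rw [b1, a6 y hy]
  rw [pvUnion_eq, e1, e2]
  by_cases hne : pvRoot p x = pvRoot p y
  · rw [if_neg (by omega)]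
    refine ⟨h, b2, b3, b4, b5, ?_, rcb, ?_⟩
    · intro z hz
      rw [pvCsize_congr n _ p z hz hpres]
      exact hbound z hz
    · intro z hz
      rw [hpres z hz]
      by_cases hc : pvRoot p z = pvRoot p y
      · rw [if_pos hc, hc, hne]
      · rw [if_neg hc]
  · rw [if_pos hne]
    have hpx_lt : pvRoot p x < n := pvRoot_lt n p hlen hent x hx
    have hpy_lt : pvRoot p y < n := pvRoot_lt n p hlen hent y hy
    have hfix_px : pvStep p (pvRoot p x) = pvRoot p x :=
      pvRoot_root n p h hlen hent hdec hb x hx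
    have hfix_py : pvStep p (pvRoot p y) = pvRoot p y :=
      pvRoot_root n p h hlen hent hdec hb y hy
    have hzero_px : h (pvRoot p x) = 0 := hzero _ hpx_lt hfix_px
    have hzero_py : h (pvRoot p y) = 0 := hzero _ hpy_lt hfix_py
    have hroot_px_p : pvRoot p (pvRoot p x) = pvRoot p x := pvRoot_fix p _ hfix_px
    have hroot_py_p : pvRoot p (pvRoot p y) = pvRoot p y := pvRoot_fix p _ hfix_py
    have hfixb_px : pvStep (pvFind (n+1) (pvFind (n+1) p x).1 y).1 (pvRoot p x) = pvRoot p x := by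
      apply pvRoot_self_step n _ h b2 b3 b4 b5 (fun z hz => hb z hz) _ hpx_lt
      rw [hpres _ hpx_lt]
      exact hroot_px_p
    have hfixb_py : pvStep (pvFind (n+1) (pvFind (n+1) p x).1 y).1 (pvRoot p y) = pvRoot p y := by
      apply pvRoot_self_step n _ h b2 b3 b4 b5 (fun z hz => hb z hz) _ hpy_lt
      rw [hpres _ hpy_lt]
      exact hroot_py_p
    have step2_py : pvStep ((pvFind (n+1) (pvFind (n+1) p x).1 y).1.set (pvRoot p y) (pvRoot p x))
        (pvRoot p y) = pvRoot p x :=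
      pvStep_set_eq _ _ _ (by rw [b2]; exact hpy_lt)
    have step2_ne : ∀ z, z ≠ pvRoot p y →
        pvStep ((pvFind (n+1) (pvFind (n+1) p x).1 y).1.set (pvRoot p y) (pvRoot p x)) z =
        pvStep (pvFind (n+1) (pvFind (n+1) p x).1 y).1 z :=
      fun z hz => pvStep_set_ne _ _ _ _ hz
    have hbr : ∀ z, z < n → pvStep (pvFind (n+1) (pvFind (n+1) p x).1 y).1 z ≠ z →
        pvRoot p (pvStep (pvFind (n+1) (pvFind (n+1) p x).1 y).1 z) = pvRoot p z := by
      intro z hz hzne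
      have := pvRoot_step n _ h b2 b3 b4 (fun w hw => hb w hw) z hz hzne
      rw [hpres z hz, hpres _ (b3 z hz)] at this
      exact this.symm
    have len2 : ((pvFind (n+1) (pvFind (n+1) p x).1 y).1.set (pvRoot p y) (pvRoot p x)).length
        = n := by rw [List.length_set]; exact b2
    have ent2 : ∀ z, z < n →
        pvStep ((pvFind (n+1) (pvFind (n+1) p x).1 y).1.set (pvRoot p y) (pvRoot p x)) z < n := by
      intro z hz
      by_cases hzy : z = pvRoot p y
      · rw [hzy, step2_py]; exact hpx_lt
      · rw [step2_ne z hzy]; exact b3 z hz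
    have hrfix : ∀ z, z < n → pvStep (pvFind (n+1) (pvFind (n+1) p x).1 y).1 z = z →
        pvRoot p z = z := by
      intro z hz he
      have := pvRoot_fix (pvFind (n+1) (pvFind (n+1) p x).1 y).1 z he
      rwa [hpres z hz] at this
    let h2 : Nat → Nat := fun w => if pvRoot p w = pvRoot p y then h w + 1 else h w
    have h2_def : ∀ w, h2 w = if pvRoot p w = pvRoot p y then h w + 1 else h w := fun _ => rfl
    have dec2 : ∀ z, z < n →
        pvStep ((pvFind (n+1) (pvFind (n+1) p x).1 y).1.set (pvRoot p y) (pvRoot p x)) z ≠ z →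
        h2 (pvStep ((pvFind (n+1) (pvFind (n+1) p x).1 y).1.set (pvRoot p y) (pvRoot p x)) z) <
        h2 z := by
      intro z hz hne2
      rw [h2_def, h2_def]
      by_cases hzy : z = pvRoot p y
      · rw [hzy, step2_py, hroot_px_p, if_neg (by omega), if_pos hroot_py_p]
        omega
      · rw [step2_ne z hzy] at hne2 ⊢
        have hd := b4 z hz hne2
        rw [hbr z hz hne2]
        by_cases hc : pvRoot p z = pvRoot p y
        · rw [if_pos hc, if_pos hc]; omega
        · rw [if_neg hc, if_neg hc]; exact hd
    have zero2 : ∀ z, z < n →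
        pvStep ((pvFind (n+1) (pvFind (n+1) p x).1 y).1.set (pvRoot p y) (pvRoot p x)) z = z →
        h2 z = 0 := by
      intro z hz he
      rw [h2_def]
      by_cases hzy : z = pvRoot p y
      · rw [hzy, step2_py] at he; exact absurd he hne
      · rw [step2_ne z hzy] at he
        have h0 := b5 z hz he
        have hfz := hrfix z hz he
        rw [if_neg (by rw [hfz]; exact hzy)]
        exact h0
    have hb2 : ∀ z, z < n → h2 z < n := by
      intro z hz
      rw [h2_def]
      by_cases hc : pvRoot p z = pvRoot p y
      · rw [if_pos hc]
        have hcz : pvCsize n p z < n := by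
          unfold pvCsize
          have hlt : ((List.range n).filter (fun w => pvRoot p w == pvRoot p z)).length <
              (List.range n).length := by
            rw [List.length_filter_lt_length_iff_exists]
            refine ⟨pvRoot p x, List.mem_range.mpr hpx_lt, ?_⟩
            simp only [beq_iff_eq, hroot_px_p, hc]
            intro hcon
            exact hne hcon
          rwa [List.length_range] at hlt
        have := hbound z hz
        omega
      · rw [if_neg hc]
        exact hb z hz
    have HC : ∀ z, z < n →
        pvRoot ((pvFind (n+1) (pvFind (n+1) p x).1 y).1.set (pvRoot p y) (pvRoot p x)) z =
        (if pvRoot p z = pvRoot p y then pvRoot p x else pvRoot p z) := by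
      have H : ∀ m z, z < n → h2 z ≤ m →
          pvRoot ((pvFind (n+1) (pvFind (n+1) p x).1 y).1.set (pvRoot p y) (pvRoot p x)) z =
          (if pvRoot p z = pvRoot p y then pvRoot p x else pvRoot p z) := by
        intro m
        induction m with
        | zero =>
          intro z hz hm
          by_cases hroot2 : pvStep ((pvFind (n+1) (pvFind (n+1) p x).1 y).1.set
              (pvRoot p y) (pvRoot p x)) z = z
          · have hzy : z ≠ pvRoot p y := by
              intro he
              rw [he, step2_py] at hroot2
              exact hne hroot2
            have hzb : pvStep (pvFind (n+1) (pvFind (n+1) p x).1 y).1 z = z := by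
              rw [← step2_ne z hzy]; exact hroot2
            have hfz := hrfix z hz hzb
            rw [pvRoot_fix _ z hroot2, if_neg (by rw [hfz]; exact hzy), hfz]
          · have := dec2 z hz hroot2
            omega
        | succ m ih =>
          intro z hz hm
          by_cases hroot2 : pvStep ((pvFind (n+1) (pvFind (n+1) p x).1 y).1.set
              (pvRoot p y) (pvRoot p x)) z = z
          · have hzy : z ≠ pvRoot p y := by
              intro he
              rw [he, step2_py] at hroot2
              exact hne hroot2
            have hzb : pvStep (pvFind (n+1) (pvFind (n+1) p x).1 y).1 z = z := by
              rw [← step2_ne z hzy]; exact hroot2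
            have hfz := hrfix z hz hzb
            rw [pvRoot_fix _ z hroot2, if_neg (by rw [hfz]; exact hzy), hfz]
          · by_cases hzy : z = pvRoot p y
            · rw [hzy]
              rw [pvRoot_step n _ h2 len2 ent2 dec2 hb2 (pvRoot p y) hpy_lt
                  (by rw [step2_py]; exact hne),
                step2_py, if_pos hroot_py_p,
                pvRoot_fix _ _ (by rw [step2_ne _ (fun hc => hne hc)]; exact hfixb_px)]
            · have hzb : pvStep (pvFind (n+1) (pvFind (n+1) p x).1 y).1 z ≠ z := by
                rw [← step2_ne z hzy]; exact hroot2
              have hd := dec2 z hz hroot2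
              rw [pvRoot_step n _ h2 len2 ent2 dec2 hb2 z hz hroot2, step2_ne z hzy]
              rw [ih _ (b3 z hz) (by rw [step2_ne z hzy] at hd; omega)]
              rw [hbr z hz hzb]
      exact fun z hz => H (h2 z) z hz (le_refl _)
    have hsum : ∀ z, z < n → (pvRoot p z = pvRoot p x ∨ pvRoot p z = pvRoot p y) →
        pvCsize n ((pvFind (n+1) (pvFind (n+1) p x).1 y).1.set (pvRoot p y) (pvRoot p x)) z =
        pvCsize n p x + pvCsize n p y := by
      intro z hz hor
      have hz2 : pvRoot ((pvFind (n+1) (pvFind (n+1) p x).1 y).1.set (pvRoot p y) (pvRoot p x)) z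
          = pvRoot p x := by
        rw [HC z hz]
        rcases hor with hc | hc
        · by_cases hcy : pvRoot p z = pvRoot p y
          · rw [if_pos hcy]
          · rw [if_neg hcy]; exact hc
        · rw [if_pos hc]
      unfold pvCsize
      rw [hz2]
      have hcongr : List.filter (fun w => pvRoot ((pvFind (n+1) (pvFind (n+1) p x).1 y).1.set
            (pvRoot p y) (pvRoot p x)) w == pvRoot p x) (List.range n) =
          List.filter (fun w => (pvRoot p w == pvRoot p x) || (pvRoot p w == pvRoot p y))
            (List.range n) := by
        apply List.filter_congr
        intro w hw
        rw [HC w (List.mem_range.mp hw)]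
        by_cases hcy : pvRoot p w = pvRoot p y
        · rw [if_pos hcy]
          simp [hcy]
        · rw [if_neg hcy]
          by_cases hcx : pvRoot p w = pvRoot p x
          · simp [hcx, hcy]
          · simp [hcx, hcy]
      rw [hcongr, pv_filter_or_length (List.range n) _ _
        (by
          intro w _ hcon
          have e1 : pvRoot p w = pvRoot p x := beq_iff_eq.mp hcon.1
          have e2 : pvRoot p w = pvRoot p y := beq_iff_eq.mp hcon.2
          exact hne (by rw [← e1, e2]))]
    refine ⟨h2, len2, ent2, dec2, zero2, ?_, ?_, ?_⟩
    · intro z hz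
      rw [h2_def]
      by_cases hcy : pvRoot p z = pvRoot p y
      · rw [if_pos hcy, hsum z hz (Or.inr hcy)]
        have h1 : h z < pvCsize n p y := by
          rw [← pvCsize_eq_of_rooteq n p z y hcy]
          exact hbound z hz
        have h2p : 0 < pvCsize n p x := pvCsize_pos n p x hx
        omega
      · by_cases hcx : pvRoot p z = pvRoot p x
        · rw [if_neg hcy, hsum z hz (Or.inl hcx)]
          have h1 : h z < pvCsize n p x := by
            rw [← pvCsize_eq_of_rooteq n p z x hcx]
            exact hbound z hz
          have h2p : 0 < pvCsize n p y := pvCsize_pos n p y hy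
          omega
        · rw [if_neg hcy]
          have hcs : pvCsize n
              ((pvFind (n+1) (pvFind (n+1) p x).1 y).1.set (pvRoot p y) (pvRoot p x)) z =
              pvCsize n p z := by
            unfold pvCsize
            have hz2 : pvRoot ((pvFind (n+1) (pvFind (n+1) p x).1 y).1.set (pvRoot p y)
                (pvRoot p x)) z = pvRoot p z := by
              rw [HC z hz, if_neg hcy]
            rw [hz2]
            congr 1
            apply List.filter_congr
            intro w hw
            rw [HC w (List.mem_range.mp hw)]
            by_cases hwy : pvRoot p w = pvRoot p y
            · rw [if_pos hwy]
              have l1 : (pvRoot p x == pvRoot p z) = false :=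
                beq_eq_false_iff_ne.mpr (fun hc => hcx hc.symm)
              have l2 : (pvRoot p w == pvRoot p z) = false :=
                beq_eq_false_iff_ne.mpr (fun hc => hcy (by rw [← hc, hwy]))
              rw [l1, l2]
            · rw [if_neg hwy]
          rw [hcs]
          exact hbound z hz
    · intro z hz
      by_cases hzy : z = pvRoot p y
      · rw [hzy, step2_py]
        have r1 : RB (pvRoot p x) x := hrel x hx
        have r2 : RB (pvRoot p y) y := hrel y hy
        have r3 : RB (pvRoot p x) y := htrans _ _ _ hpx_lt hx hy r1 hxy
        exact htrans _ _ _ hpx_lt hy hpy_lt r3 (hsymm _ _ hpy_lt hy r2)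
      · rw [step2_ne z hzy]
        exact rcb z hz
    · exact HC

theorem pvInv_union (lcp : List (List Int)) (hR : pvReq lcp) (p : List Nat)
    (hinv : pvInv lcp p) (x y : Nat) (hx : x < lcp.length) (hy : y < lcp.length)
    (hxy : 0 < pvGet lcp x y) :
    pvInv lcp (pvUnion (lcp.length + 1) p x y) ∧
    (∀ z w, z < lcp.length → w < lcp.length → pvRoot p z = pvRoot p w →
      pvRoot (pvUnion (lcp.length + 1) p x y) z = pvRoot (pvUnion (lcp.length + 1) p x y) w) ∧
    pvRoot (pvUnion (lcp.length + 1) p x y) x = pvRoot (pvUnion (lcp.length + 1) p x y) y := by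
  obtain ⟨⟨h, hlen, hent, hdec, hzero, hbound⟩, hrc⟩ := hinv
  obtain ⟨h2, u1, u2, u3, u4, u5, u6, u7⟩ :=
    pvUnion_go lcp.length (fun a b => 0 < pvGet lcp a b) p h hlen hent hdec hzero hbound
      hR.2.1 hR.2.2 hrc x y hx hy hxy
  refine ⟨⟨⟨h2, u1, u2, u3, u4, u5⟩, u6⟩, ?_, ?_⟩
  · intro z w hz hw he
    rw [u7 z hz, u7 w hw, he]
  · rw [u7 x hx, u7 y hy, if_pos rfl]
    by_cases hc : pvRoot p x = pvRoot p y
    · rw [if_pos hc]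
    · rw [if_neg hc]

theorem pvInner_fold (lcp : List (List Int)) (hR : pvReq lcp) (i : Nat) (hi : i < lcp.length) :
    ∀ (js : List Nat) (p : List Nat), (∀ j ∈ js, j < lcp.length) → pvInv lcp p →
    pvInv lcp (js.foldl
      (fun p j => if 0 < pvGet lcp i j then pvUnion (lcp.length + 1) p i j else p) p) ∧
    (∀ z w, z < lcp.length → w < lcp.length → pvRoot p z = pvRoot p w →
      pvRoot (js.foldl
        (fun p j => if 0 < pvGet lcp i j then pvUnion (lcp.length + 1) p i j else p) p) z =
      pvRoot (js.foldl
        (fun p j => if 0 < pvGet lcp i j then pvUnion (lcp.length + 1) p i j else p) p) w) ∧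
    (∀ j ∈ js, 0 < pvGet lcp i j →
      pvRoot (js.foldl
        (fun p j => if 0 < pvGet lcp i j then pvUnion (lcp.length + 1) p i j else p) p) i =
      pvRoot (js.foldl
        (fun p j => if 0 < pvGet lcp i j then pvUnion (lcp.length + 1) p i j else p) p) j) := by
  intro js
  induction js with
  | nil => intro p _ hinv; exact ⟨hinv, fun z w _ _ he => he, fun j hj => absurd hj (by simp)⟩
  | cons j js ih =>
    intro p hjs hinv
    simp only [List.foldl_cons]
    by_cases hrel : 0 < pvGet lcp i j
    · rw [if_pos hrel]
      obtain ⟨hinv1, hpres1, hmerge1⟩ :=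
        pvInv_union lcp hR p hinv i j hi (hjs j List.mem_cons_self) hrel
      obtain ⟨hinv2, hpres2, hmerge2⟩ := ih _ (fun w hw => hjs w (List.mem_cons_of_mem j hw)) hinv1
      refine ⟨hinv2, ?_, ?_⟩
      · intro z w hz hw he
        exact hpres2 z w hz hw (hpres1 z w hz hw he)
      · intro w hw hrw
        rcases List.mem_cons.mp hw with hwj | hwm
        · rw [hwj]
          exact hpres2 i j hi (hjs j List.mem_cons_self) hmerge1
        · exact hmerge2 w hwm hrw
    · rw [if_neg hrel]
      obtain ⟨hinv2, hpres2, hmerge2⟩ := ih _ (fun w hw => hjs w (List.mem_cons_of_mem j hw)) hinv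
      refine ⟨hinv2, hpres2, ?_⟩
      intro w hw hrw
      rcases List.mem_cons.mp hw with hwj | hwm
      · rw [hwj] at hrw; exact absurd hrw hrel
      · exact hmerge2 w hwm hrw

theorem pvOuter_fold (lcp : List (List Int)) (hR : pvReq lcp) :
    ∀ (is : List Nat) (p : List Nat), (∀ i ∈ is, i < lcp.length) → pvInv lcp p →
    pvInv lcp (is.foldl
      (fun p i => (List.range lcp.length).foldl
        (fun p j => if 0 < pvGet lcp i j then pvUnion (lcp.length + 1) p i j else p) p) p) ∧
    (∀ z w, z < lcp.length → w < lcp.length → pvRoot p z = pvRoot p w →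
      pvRoot (is.foldl
        (fun p i => (List.range lcp.length).foldl
          (fun p j => if 0 < pvGet lcp i j then pvUnion (lcp.length + 1) p i j else p) p) p) z =
      pvRoot (is.foldl
        (fun p i => (List.range lcp.length).foldl
          (fun p j => if 0 < pvGet lcp i j then pvUnion (lcp.length + 1) p i j else p) p) p) w) ∧
    (∀ i ∈ is, ∀ j, j < lcp.length → 0 < pvGet lcp i j →
      pvRoot (is.foldl
        (fun p i => (List.range lcp.length).foldl
          (fun p j => if 0 < pvGet lcp i j then pvUnion (lcp.length + 1) p i j else p) p) p) i =
      pvRoot (is.foldl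
        (fun p i => (List.range lcp.length).foldl
          (fun p j => if 0 < pvGet lcp i j then pvUnion (lcp.length + 1) p i j else p) p) p) j) := by
  intro is
  induction is with
  | nil =>
    intro p _ hinv
    exact ⟨hinv, fun z w _ _ he => he, fun i hi => absurd hi (by simp)⟩
  | cons i is ih =>
    intro p his hinv
    simp only [List.foldl_cons]
    obtain ⟨hinv1, hpres1, hmerge1⟩ := pvInner_fold lcp hR i (his i List.mem_cons_self)
      (List.range lcp.length) p (fun j hj => List.mem_range.mp hj) hinv
    obtain ⟨hinv2, hpres2, hmerge2⟩ := ih _ (fun w hw => his w (List.mem_cons_of_mem i hw)) hinv1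
    refine ⟨hinv2, ?_, ?_⟩
    · intro z w hz hw he
      exact hpres2 z w hz hw (hpres1 z w hz hw he)
    · intro w hw j hj hrel
      rcases List.mem_cons.mp hw with hwi | hwm
      · rw [hwi] at hrel ⊢
        exact hpres2 i j (his i List.mem_cons_self) hj
          (hmerge1 j (List.mem_range.mpr hj) hrel)
      · exact hmerge2 w hwm j hj hrel

theorem pvInv_init (lcp : List (List Int)) (hR : pvReq lcp) :
    pvInv lcp (List.range lcp.length) := by
  have hstep : ∀ z, z < lcp.length → pvStep (List.range lcp.length) z = z := by
    intro z hz
    unfold pvStep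
    rw [List.getD_eq_getElem?_getD, List.getElem?_range hz]
    rfl
  refine ⟨⟨fun _ => 0, List.length_range, ?_, ?_, ?_, ?_⟩, ?_⟩
  · intro x hx; rw [hstep x hx]; exact hx
  · intro x hx hne; exact absurd (hstep x hx) hne
  · intro x hx _; rfl
  · intro x hx; exact pvCsize_pos lcp.length _ x hx
  · intro z hz; rw [hstep z hz]; exact hR.1 z hz

theorem pvUnions_spec (lcp : List (List Int)) (hR : pvReq lcp) :
    pvInv lcp (pvUnions lcp lcp.length (lcp.length + 1)) ∧
    (∀ i j, i < lcp.length → j < lcp.length →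
      (0 < pvGet lcp i j ↔
        pvRoot (pvUnions lcp lcp.length (lcp.length + 1)) i =
        pvRoot (pvUnions lcp lcp.length (lcp.length + 1)) j)) := by
  obtain ⟨hinv, hpres, hmerge⟩ := pvOuter_fold lcp hR (List.range lcp.length)
    (List.range lcp.length) (fun i hi => List.mem_range.mp hi) (pvInv_init lcp hR)
  constructor
  · exact hinv
  · intro i j hi hj
    constructor
    · intro hrel
      exact hmerge i (List.mem_range.mpr hi) j hj hrel
    · intro heq
      obtain ⟨⟨h, hlen, hent, hdec, hzero, hbound⟩, hrc⟩ := hinv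
      have hb : ∀ z, z < lcp.length → h z < lcp.length :=
        fun z hz => lt_of_lt_of_le (hbound z hz) (pvCsize_le lcp.length _ z)
      have hrel : ∀ z, z < lcp.length →
          0 < pvGet lcp (pvRoot (pvUnions lcp lcp.length (lcp.length + 1)) z) z :=
        pvRoot_relGen lcp.length (fun a b => 0 < pvGet lcp a b) _ h hlen hent hdec hb
          hR.2.1 hR.2.2 hrc
      have r1 := hrel i hi
      have r2 := hrel j hj
      have hroot_lt := pvRoot_lt lcp.length _ hlen hent i hi
      rw [heq] at r1
      exact hR.2.2 i _ j hi (pvRoot_lt lcp.length _ hlen hent j hj) hj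
        (hR.2.1 _ i (pvRoot_lt lcp.length _ hlen hent j hj) hi r1) r2

-- find/assign layer in pvInv terms
theorem pvInv_find (lcp : List (List Int)) (hR : pvReq lcp) (p : List Nat)
    (hinv : pvInv lcp p) (x : Nat) (hx : x < lcp.length) :
    (pvFind (lcp.length + 1) p x).2 = pvRoot p x ∧
    pvInv lcp (pvFind (lcp.length + 1) p x).1 ∧
    (∀ z, z < lcp.length → pvRoot (pvFind (lcp.length + 1) p x).1 z = pvRoot p z) := by
  obtain ⟨⟨h, hlen, hent, hdec, hzero, hbound⟩, hrc⟩ := hinv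
  have hb : ∀ z, z < lcp.length → h z < lcp.length :=
    fun z hz => lt_of_lt_of_le (hbound z hz) (pvCsize_le lcp.length p z)
  obtain ⟨a1, a2, a3, a4, a5, a6, a7⟩ :=
    pvFind_go lcp.length p h hlen hent hdec hzero hb (lcp.length + 1) x hx
      (by have := hb x hx; omega)
  have hrel : ∀ z, z < lcp.length → 0 < pvGet lcp (pvRoot p z) z :=
    pvRoot_relGen lcp.length (fun a b => 0 < pvGet lcp a b) p h hlen hent hdec hb
      hR.2.1 hR.2.2 hrc
  refine ⟨a1, ⟨⟨h, a2, a3, a4, a5, ?_⟩, ?_⟩, a6⟩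
  · intro z hz
    rw [pvCsize_congr lcp.length _ p z hz a6]
    exact hbound z hz
  · intro z hz
    rcases a7 z hz with hc | hc
    · rw [hc]; exact hrc z hz
    · rw [hc]; exact hrel z hz

theorem pvAssign_cons (fuel i : Nat) (is : List Nat) (p : List Nat)
    (gc : PySem.Dict Nat Char) (res : List String) (cur : Char) :
    pvAssign fuel (i :: is) p gc res cur =
      match gc.get? (pvFind fuel p i).2 with
      | some c => pvAssign fuel is (pvFind fuel p i).1 gc (res.set i (String.ofList [c])) cur
      | none =>
        if 'z' < cur then none
        else pvAssign fuel is (pvFind fuel p i).1 (gc.insert (pvFind fuel p i).2 cur)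
          (res.set i (String.ofList [cur])) (Char.ofNat (cur.toNat + 1)) := rfl

theorem pvResPart_set (lcp : List (List Int)) (i : Nat) (hi : i < lcp.length) :
    ((List.range lcp.length).map (fun j => if j < i then pvWspec lcp j else "")).set i
        (pvWspec lcp i) =
      (List.range lcp.length).map (fun j => if j < i + 1 then pvWspec lcp j else "") := by
  apply pv_list_eq_of_getD
  · simp
  · intro t htl
    simp only [List.length_set, List.length_map, List.length_range] at htl
    rw [pv_getD_map_range _ _ _ _ htl]
    by_cases hti : t = i
    · rw [hti, pv_getD_set_eq _ _ _ _ (by simp [hi]), if_pos (by omega)]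
    · rw [pv_getD_set_ne _ _ _ _ _ hti, pv_getD_map_range _ _ _ _ htl]
      by_cases hlt : t < i
      · rw [if_pos hlt, if_pos (by omega)]
      · rw [if_neg hlt, if_neg (by omega)]

theorem pvAssign_go (lcp : List (List Int)) (hR : pvReq lcp) (pF : List Nat)
    (hiff : ∀ i j, i < lcp.length → j < lcp.length →
      (0 < pvGet lcp i j ↔ pvRoot pF i = pvRoot pF j)) :
    ∀ d i, i + d = lcp.length →
    ∀ (p : List Nat) (gc : PySem.Dict Nat Char) (res : List String),
    pvInv lcp p →
    (∀ z, z < lcp.length → pvRoot p z = pvRoot pF z) →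
    (∀ k, k < i → gc.get? (pvRoot pF k) = some (pvLetter (pvL lcp (pvMc lcp k)))) →
    (∀ r, (∀ k, k < i → pvRoot pF k ≠ r) → gc.get? r = none) →
    res = (List.range lcp.length).map (fun j => if j < i then pvWspec lcp j else "") →
    pvL lcp i ≤ 26 →
    pvAssign (lcp.length + 1) (List.range' i d) p gc res (pvLetter (pvL lcp i)) =
      (if 26 < pvL lcp lcp.length then none else some (pvWordSpec lcp)) := by
  intro d
  induction d with
  | zero =>
    intro i hsum p gc res hinv hpres hg1 hg2 hres hL
    have hin : i = lcp.length := by omega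
    rw [hin] at hL
    rw [if_neg (by omega)]
    show some res = some (pvWordSpec lcp)
    rw [hres, hin]
    congr 1
    apply List.map_congr_left
    intro j hj
    rw [if_pos (List.mem_range.mp hj)]
  | succ d ih =>
    intro i hsum p gc res hinv hpres hg1 hg2 hres hL
    have hi : i < lcp.length := by omega
    rw [List.range'_succ, pvAssign_cons]
    obtain ⟨f1, f2, f3⟩ := pvInv_find lcp hR p hinv i hi
    have hroot : (pvFind (lcp.length + 1) p i).2 = pvRoot pF i := by rw [f1, hpres i hi]
    have hpres' : ∀ z, z < lcp.length →
        pvRoot (pvFind (lcp.length + 1) p i).1 z = pvRoot pF z := by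
      intro z hz
      rw [f3 z hz, hpres z hz]
    by_cases hex : ∃ k, k < i ∧ pvRoot pF k = pvRoot pF i
    · obtain ⟨k, hk, hke⟩ := hex
      have hrel : 0 < pvGet lcp k i := (hiff k i (by omega) hi).mpr hke
      have hmk : pvMc lcp k = pvMc lcp i := pvMc_eq_of_rel lcp hR k i (by omega) hi hrel
      have hscrut : gc.get? (pvFind (lcp.length + 1) p i).2 =
          some (pvLetter (pvL lcp (pvMc lcp i))) := by
        rw [hroot, ← hke, hg1 k hk, hmk]
      rw [hscrut]
      have hmci : pvMc lcp i < i := by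
        have h1 := pvMc_le lcp k
        have h2 := pvMc_le lcp i
        omega
      have hLs : pvL lcp (i+1) = pvL lcp i := by
        rw [pvL_succ, if_neg (by omega)]; omega
      have hres' : res.set i (String.ofList [pvLetter (pvL lcp (pvMc lcp i))]) =
          (List.range lcp.length).map (fun j => if j < i + 1 then pvWspec lcp j else "") := by
        rw [hres]
        exact pvResPart_set lcp i hi
      rw [← hLs] at hL ⊢
      refine ih (i+1) (by omega) _ gc _ f2 hpres' ?_ ?_ hres' hL
      · intro k' hk'
        by_cases hki : k' = i
        · rw [hki, ← hke, hg1 k hk, hmk]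
        · exact hg1 k' (by omega)
      · intro r hr
        refine hg2 r (fun k' hk' => hr k' (by omega))
    · have hnone : gc.get? (pvFind (lcp.length + 1) p i).2 = none := by
        rw [hroot]
        exact hg2 _ (fun k hk he => hex ⟨k, hk, he⟩)
      rw [hnone]
      have hmi : pvMc lcp i = i := by
        by_contra hne
        have hlt : pvMc lcp i < i := by have := pvMc_le lcp i; omega
        have hrel : 0 < pvGet lcp (pvMc lcp i) i := pvMc_rel lcp hR i hi
        exact hex ⟨pvMc lcp i, hlt, (hiff _ i (by omega) hi).mp hrel⟩
      by_cases hov : pvL lcp i = 26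
      · rw [if_pos ((pvLetter_gt_z _ hL).mpr hov)]
        have h1 : pvL lcp (i+1) = 27 := by rw [pvL_succ, if_pos hmi]; omega
        have h2 := pvL_mono lcp (i+1) lcp.length (by omega)
        rw [if_pos (by omega)]
      · rw [if_neg (fun hgt => hov ((pvLetter_gt_z _ hL).mp hgt))]
        have hLs : pvL lcp (i+1) = pvL lcp i + 1 := by rw [pvL_succ, if_pos hmi]
        have hcur : Char.ofNat ((pvLetter (pvL lcp i)).toNat + 1) =
            pvLetter (pvL lcp (i+1)) := by
          rw [hLs]
          exact pvLetter_succ _ (by omega)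
        rw [hcur]
        have hres' : res.set i (String.ofList [pvLetter (pvL lcp i)]) =
            (List.range lcp.length).map
              (fun j => if j < i + 1 then pvWspec lcp j else "") := by
          rw [hres]
          have : pvWspec lcp i = String.ofList [pvLetter (pvL lcp i)] := by
            unfold pvWspec
            rw [hmi]
          rw [← this]
          exact pvResPart_set lcp i hi
        rw [hroot]
        refine ih (i+1) (by omega) _ _ _ f2 hpres' ?_ ?_ hres' (by omega)
        · intro k hk
          by_cases hki : k = i
          · rw [hki, PySem.Dict.get?_insert_self]
            rw [hmi]
          · rw [PySem.Dict.get?_insert_of_ne _ _ (fun he => hex ⟨k, by omega, he⟩)]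
            exact hg1 k (by omega)
        · intro r hr
          rw [PySem.Dict.get?_insert_of_ne _ _ (fun he => hr i (by omega) he.symm)]
          exact hg2 r (fun k hk => hr k (by omega))

theorem pvAssign_main (lcp : List (List Int)) (hR : pvReq lcp) :
    pvAssign (lcp.length + 1) (List.range lcp.length) (pvUnions lcp lcp.length (lcp.length + 1))
        PySem.Dict.empty (List.replicate lcp.length "") 'a' =
      (if 26 < pvL lcp lcp.length then none else some (pvWordSpec lcp)) := by
  obtain ⟨hinv, hiff⟩ := pvUnions_spec lcp hR
  have h0 : (List.replicate lcp.length "") =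
      (List.range lcp.length).map (fun j => if j < 0 then pvWspec lcp j else "") := by
    apply pv_list_eq_of_getD
    · simp
    · intro t htl
      simp only [List.length_replicate] at htl
      rw [pv_getD_replicate _ _ _ _ htl, pv_getD_map_range _ _ _ _ htl, if_neg (by omega)]
  have hL0 : pvL lcp 0 = 0 := by simp [pvL]
  have ha : 'a' = pvLetter (pvL lcp 0) := by rw [hL0]; decide
  rw [List.range_eq_range', ha, h0]
  exact pvAssign_go lcp hR _ hiff lcp.length 0 (by omega) _ _ _ hinv
    (fun z _ => rfl) (fun k hk => by omega)
    (fun r _ => PySem.Dict.get?_empty r)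
    rfl (by omega)

theorem pvFinish_empty (lcp : List (List Int)) (o : Option (List String))
    (h : ∀ res, o = some res → pvValid lcp res = false) : pvFinish lcp o = "" := by
  cases o with
  | none => rfl
  | some res =>
    show (if pvValid lcp res = true then PySem.Str.join "" res else "") = ""
    rw [h res rfl]
    simp

theorem pvBuilders_eq (lcp : List (List Int)) (hR : pvReq lcp) :
    pvAssign (lcp.length + 1) (List.range lcp.length) (pvUnions lcp lcp.length (lcp.length + 1))
        PySem.Dict.empty (List.replicate lcp.length "") 'a' =
      pvGreedy lcp lcp.length (List.range lcp.length) (List.replicate lcp.length "") 'a' := by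
  rw [pvAssign_main lcp hR, pvGreedy_main lcp hR]

-- ===== VERDICT (by name: the statement is the Claim_ definition above) =====
theorem findTheString_spec : Claim_equal_findTheString := by
  intro lcp _ _
  unfold Spec_findTheString
  show pvFinish lcp (pvAssign (lcp.length + 1) (List.range lcp.length)
      (pvUnions lcp lcp.length (lcp.length + 1)) PySem.Dict.empty
      (List.replicate lcp.length "") 'a') =
    pvFinish lcp (pvGreedy lcp lcp.length (List.range lcp.length)
      (List.replicate lcp.length "") 'a')
  by_cases hA : ∃ res, pvAssign (lcp.length + 1) (List.range lcp.length)
      (pvUnions lcp lcp.length (lcp.length + 1)) PySem.Dict.empty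
      (List.replicate lcp.length "") 'a' = some res ∧ pvValid lcp res = true
  · obtain ⟨res, he, hv⟩ := hA
    rw [pvBuilders_eq lcp (pvReq_of_valid lcp res hv)]
  · by_cases hB : ∃ res, pvGreedy lcp lcp.length (List.range lcp.length)
        (List.replicate lcp.length "") 'a' = some res ∧ pvValid lcp res = true
    · obtain ⟨res, he, hv⟩ := hB
      rw [pvBuilders_eq lcp (pvReq_of_valid lcp res hv)]
    · rw [pvFinish_empty lcp _ (fun res he => by
          rcases hvb : pvValid lcp res with _ | _
          · rfl
          · exact absurd ⟨res, he, hvb⟩ hA),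
        pvFinish_empty lcp _ (fun res he => by
          rcases hvb : pvValid lcp res with _ | _
          · rfl
          · exact absurd ⟨res, he, hvb⟩ hB)]
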